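-- pv_equiv track=rewrite | github.com/swat-model/QSWAT | QSWAT3/runTNC.py | treeLen
-- ===== SOURCE A (Python) =====
-- def treeLen(n, ds, lengths):
--     """Get number of steps from catchment n to exit, storing computed ones in lengths."""
--     storedLength = lengths.get(n, -1)
--     if storedLength >= 0:
--         return storedLength
--     dsn = ds.get(n, -1)
--     if dsn == -1:
--         # n is an exit
--         lengths[n] = 0
--         return 0
--     else:
--         length = treeLen(dsn, ds, lengths)
--         lengths[n] = length + 1
--         return length + 1
-- ===== SOURCE B (Python) =====
-- def treeLen(n, ds, lengths):
--     """Get number of steps from catchment n to exit, storing computed ones in lengths.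
--     Two-pass counting version: first count the uncached steps k to a stop node and
--     find the base value there; then walk the chain again writing base+i for i=k..1."""
--     # pass 1: count uncached steps until a cached node or an exit
--     k = 0
--     node = n
--     while lengths.get(node, -1) < 0 and ds.get(node, -1) != -1:
--         k += 1
--         node = ds[node]
--     stored = lengths.get(node, -1)
--     if stored >= 0:
--         base = stored
--     else:
--         lengths[node] = 0
--         base = 0
--     # pass 2: walk the chain again, filling the cache (values base+k .. base+1)
--     node = n
--     for i in range(k, 0, -1):
--         lengths[node] = base + i
--         node = ds[node]
--     return base + k
-- ===== Notes on version B (the rewrite author's own statement) =====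
-- stated objective: alternative
-- what changed: Replaces the memoized recursion by two iterative passes: a counting walk that finds the distance k to the first cached/exit node and the base value there, then a second walk over the same chain that writes base+i into the cache, returning base+k; no recursion and no path list.
import Mathlib
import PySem

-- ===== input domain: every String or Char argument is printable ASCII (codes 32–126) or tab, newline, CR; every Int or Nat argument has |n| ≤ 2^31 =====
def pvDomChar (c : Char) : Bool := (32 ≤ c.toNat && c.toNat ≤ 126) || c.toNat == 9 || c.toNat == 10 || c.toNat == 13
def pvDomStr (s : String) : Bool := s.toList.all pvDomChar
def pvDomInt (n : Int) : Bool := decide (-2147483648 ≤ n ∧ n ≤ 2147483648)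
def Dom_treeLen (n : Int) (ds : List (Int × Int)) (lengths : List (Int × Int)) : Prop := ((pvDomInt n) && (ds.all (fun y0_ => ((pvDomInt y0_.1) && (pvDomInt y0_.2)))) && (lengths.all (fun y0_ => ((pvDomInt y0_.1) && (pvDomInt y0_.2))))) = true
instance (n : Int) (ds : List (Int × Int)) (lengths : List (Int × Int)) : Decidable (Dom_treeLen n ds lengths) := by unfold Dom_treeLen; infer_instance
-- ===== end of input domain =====

-- B replaces the memoized recursion by two iterative passes: a counting walk (distance k to the
-- first cached/exit node, plus the base value there) and a cache-filling second walk, returning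
-- base + k. Both Pythons mutate `lengths`; the theorems are about the RETURN value only (the
-- cache entries written were checked equal by testing, not proved here).

-- ===== PORT A =====
-- A's recursion, with a fuel guard for totality only (never exhausted inside Pre_);
-- the mutable dict `lengths` is threaded as state.
def treeLenAux (fuel : Nat) (n : Int) (ds : PySem.Dict Int Int) (lengths : PySem.Dict Int Int) :
    Int × PySem.Dict Int Int :=
  match fuel with
  | 0 => (0, lengths)  -- unreachable under Pre_treeLen
  | fuel + 1 =>
    let storedLength := lengths.getD n (-1)
    if storedLength ≥ 0 then (storedLength, lengths)
    else
      let dsn := ds.getD n (-1)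
      if dsn = -1 then (0, lengths.insert n 0)
      else
        let r := treeLenAux fuel dsn ds lengths
        (r.1 + 1, r.2.insert n (r.1 + 1))

def treeLen (n : Int) (ds : List (Int × Int)) (lengths : List (Int × Int)) : Int :=
  (treeLenAux (ds.length + 1) n (PySem.Dict.ofList ds) (PySem.Dict.ofList lengths)).1

-- ===== PORT B =====
-- Source B's pass 1: the counting while-loop; returns (k, final node) (lengths is not written here).
def countB (fuel : Nat) (k : Int) (node : Int) (ds : PySem.Dict Int Int)
    (lengths : PySem.Dict Int Int) : Int × Int :=
  match fuel with
  | 0 => (k, node)  -- unreachable under Pre_treeLen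
  | fuel + 1 =>
    if lengths.getD node (-1) < 0 && ds.getD node (-1) != -1 then
      countB fuel (k + 1) (ds.getD node (-1)) ds lengths
    else (k, node)

def treeLen_alt (n : Int) (ds : List (Int × Int)) (lengths : List (Int × Int)) : Int :=
  let d := PySem.Dict.ofList ds
  let l := PySem.Dict.ofList lengths
  let r := countB (ds.length + 1) 0 n d l
  let k := r.1
  let stored := l.getD r.2 (-1)
  let (base, l1) := if stored ≥ 0 then (stored, l) else ((0 : Int), l.insert r.2 0)
  -- pass 2: 'for i in range(k, 0, -1)' fills the cache; it only mutates lengths,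
  -- which the function does not return, so its result is unused here.
  let _fill := (PySem.List.pyRange k 0 (-1)).foldl
      (fun st i => (d.getD st.1 (-1), st.2.insert st.1 (base + i))) (n, l1)
  base + k

-- ===== PRECONDITION & SPEC =====
-- stepPre maps a node one step downstream, freezing at nodes where A's recursion stops.
def stopPre (ds : PySem.Dict Int Int) (lengths : PySem.Dict Int Int) (m : Int) : Bool :=
  lengths.getD m (-1) ≥ 0 || ds.getD m (-1) = -1
def stepPre (ds : PySem.Dict Int Int) (lengths : PySem.Dict Int Int) (m : Int) : Int :=
  if stopPre ds lengths m then m else ds.getD m (-1)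
-- Pre_ excludes exactly the inputs where the downstream chain from n never reaches a cached or
-- exit node (a ds-cycle): there Python A raises RecursionError (and B loops).
def Pre_treeLen (n : Int) (ds : List (Int × Int)) (lengths : List (Int × Int)) : Prop :=
  stopPre (PySem.Dict.ofList ds) (PySem.Dict.ofList lengths)
    ((stepPre (PySem.Dict.ofList ds) (PySem.Dict.ofList lengths))^[ds.length] n) = true
instance (n : Int) (ds : List (Int × Int)) (lengths : List (Int × Int)) : Decidable (Pre_treeLen n ds lengths) := by unfold Pre_treeLen; infer_instance

def pvWitness_treeLen : Int × (List (Int × Int)) × (List (Int × Int)) :=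
  (1, [(1, 2), (2, 3)], [(3, 5)])

def Spec_treeLen (n : Int) (ds : List (Int × Int)) (lengths : List (Int × Int)) (out : Int) : Prop := out = treeLen_alt n ds lengths
instance (n : Int) (ds : List (Int × Int)) (lengths : List (Int × Int)) (out : Int) : Decidable (Spec_treeLen n ds lengths out) := by unfold Spec_treeLen; infer_instance

-- ===== CLAIM (what is proved, stated in full; the proofs are below) =====
def Claim_equal_treeLen : Prop := ∀ (n : Int) (ds : List (Int × Int)) (lengths : List (Int × Int)), Dom_treeLen n ds lengths → Pre_treeLen n ds lengths → Spec_treeLen n ds lengths (treeLen n ds lengths)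

-- ===== LEMMAS AND PROOFS =====

-- The counting walk's k plus the base value at its final node equals A's recursive value plus
-- the starting k, whenever the chain stops strictly within the (shared) fuel.
theorem countB_spec (fuel : Nat) (ds lengths : PySem.Dict Int Int) :
    ∀ (n k : Int),
      (∃ j, j < fuel ∧ stopPre ds lengths ((stepPre ds lengths)^[j] n) = true) →
      (let r := countB fuel k n ds lengths
       (if lengths.getD r.2 (-1) ≥ 0 then lengths.getD r.2 (-1) else 0) + r.1)
        = (treeLenAux fuel n ds lengths).1 + k := by
  induction fuel with
  | zero => intro n k h; exact absurd h.choose_spec.1 (Nat.not_lt_zero _)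
  | succ fuel ih =>
    intro n k h
    obtain ⟨j, hj, hstop⟩ := h
    simp only [countB, treeLenAux]
    by_cases h1 : lengths.getD n (-1) ≥ 0
    · have hc : ¬ (lengths.getD n (-1) < 0 && ds.getD n (-1) != -1) = true := by
        simp; omega
      simp only [if_neg hc, if_pos h1]
    · by_cases h2 : ds.getD n (-1) = -1
      · have hc : ¬ (lengths.getD n (-1) < 0 && ds.getD n (-1) != -1) = true := by
          simp [h2]
        simp only [if_neg hc, if_pos h2]
        simp [h1]
      · have hc : (lengths.getD n (-1) < 0 && ds.getD n (-1) != -1) = true := by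
          simp [h2]; omega
        have hns : stopPre ds lengths n = false := by
          simp [stopPre, h2]; omega
        have hj0 : j ≠ 0 := by
          intro h0; rw [h0] at hstop
          simp [Function.iterate_zero, hns] at hstop
        obtain ⟨j', rfl⟩ := Nat.exists_eq_succ_of_ne_zero hj0
        have hstep : stepPre ds lengths n = ds.getD n (-1) := by
          simp [stepPre, hns]
        have hstop' : stopPre ds lengths ((stepPre ds lengths)^[j'] (ds.getD n (-1))) = true := by
          rw [Function.iterate_succ_apply, hstep] at hstop; exact hstop
        simp only [if_pos hc, if_neg h1, if_neg h2]
        have := ih (ds.getD n (-1)) (k + 1) ⟨j', Nat.lt_of_succ_lt_succ hj, hstop'⟩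
        simp only at this ⊢
        omega

theorem pvWitness_ok :
    Dom_treeLen pvWitness_treeLen.1 pvWitness_treeLen.2.1 pvWitness_treeLen.2.2 ∧
    Pre_treeLen pvWitness_treeLen.1 pvWitness_treeLen.2.1 pvWitness_treeLen.2.2 := by
  decide

-- ===== VERDICT (by name: the statement is the Claim_ definition above) =====
theorem treeLen_spec : Claim_equal_treeLen := by
  intro n ds lengths _
  unfold Spec_treeLen treeLen treeLen_alt
  intro hpre
  have h := countB_spec (ds.length + 1) (PySem.Dict.ofList ds) (PySem.Dict.ofList lengths) n 0
    ⟨ds.length, Nat.lt_succ_self _, hpre⟩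
  simp only at h ⊢
  split_ifs at h ⊢ <;> omega
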